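-- pv_equiv track=rewrite | github.com/mcnamara-charles/planter | python/plants_ingest.py | _pick_preferred_common
-- ===== SOURCE A (Python) =====
-- def _pick_preferred_common(cands: list[str]) -> str:
--     """
--     Choose a single display string from multiple USDA 'National Common Name' values:
--       1) most frequent
--       2) fewest words
--       3) shortest length
--     """
--     if not cands:
--         return ""
--     freq = {}
--     for c in cands:
--         k = c.strip()
--         if not k:
--             continue
--         freq[k] = freq.get(k, 0) + 1
--     if not freq:
--         return ""
--     # tie-breakers
--     def keyfn(s: str):
--         return (freq[s], -len(s.split()), -len(s))  # max() → highest freq, then fewer words, then shorter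
--     return max(freq.keys(), key=keyfn)
-- ===== SOURCE B (Python) =====
-- def _pick_preferred_common(cands: list[str]) -> str:
--     """
--     Staged refinement instead of a single composite-key max:
--     keep all keys with the top frequency, then those with fewest words,
--     then those with shortest length, and return the first survivor.
--     """
--     freq = {}
--     for c in cands:
--         k = c.strip()
--         if k:
--             freq[k] = freq.get(k, 0) + 1
--     keys = list(freq)
--     if not keys:
--         return ""
--     top = max(freq[k] for k in keys)
--     keys = [k for k in keys if freq[k] == top]
--     fewest = min(len(k.split()) for k in keys)
--     keys = [k for k in keys if len(k.split()) == fewest]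
--     shortest = min(len(k) for k in keys)
--     for k in keys:
--         if len(k) == shortest:
--             return k
-- ===== Notes on version B (the rewrite author's own statement) =====
-- stated objective: alternative
-- what changed: Replaces the single max() over keys with a composite (freq, -words, -len) tuple key by a three-stage refinement: filter the keys to those with maximal frequency, then to those with fewest words, then to those with shortest length, and return the first survivor.
import Mathlib
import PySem

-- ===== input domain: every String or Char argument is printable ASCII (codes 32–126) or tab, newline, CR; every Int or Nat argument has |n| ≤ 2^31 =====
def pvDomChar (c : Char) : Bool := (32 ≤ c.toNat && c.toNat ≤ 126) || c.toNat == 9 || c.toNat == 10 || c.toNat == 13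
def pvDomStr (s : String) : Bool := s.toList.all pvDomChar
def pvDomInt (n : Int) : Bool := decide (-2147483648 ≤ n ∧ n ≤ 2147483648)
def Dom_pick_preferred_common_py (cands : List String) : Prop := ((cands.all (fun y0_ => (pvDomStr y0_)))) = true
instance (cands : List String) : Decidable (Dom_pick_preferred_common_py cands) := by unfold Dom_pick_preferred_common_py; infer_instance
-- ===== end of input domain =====

-- B replaces A's single max() with a composite tuple key by a three-stage filter refinement
-- (top frequency, then fewest words, then shortest); an alternative decomposition, same cost.


-- ===== PORT A =====
-- freq-building loop of A: 'for c in cands: k = c.strip(); if not k: continue; freq[k] = freq.get(k, 0) + 1'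
def pvFreqA (cands : List String) : PySem.Dict String Int :=
  cands.foldl
    (fun d c =>
      let k := PySem.Str.strip c
      if k = "" then d else d.insert k (d.getD k 0 + 1))
    PySem.Dict.empty

-- len(s.split()) as a Python int
def pvWords (s : String) : Int := ((PySem.Str.split₀ s).length : Int)

-- keyfn(s) = (freq[s], -len(s.split()), -len(s)); 'freq[s]' ported as getD 0 — exact, since
-- every s it is applied to is a key of freq
def pvKeyA (freq : PySem.Dict String Int) (s : String) : Int × Int × Int :=
  (freq.getD s 0, -(pvWords s), -(PySem.Str.len s))

-- Python's lexicographic '<' on int 3-tuples, ported component by component (PySem has no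
-- 3-tuple key helper, and Lean's product order is not Python's tuple order)
def pvLt3 (p q : Int × Int × Int) : Bool :=
  decide (p.1 < q.1) ||
    (decide (p.1 = q.1) &&
      (decide (p.2.1 < q.2.1) || (decide (p.2.1 = q.2.1) && decide (p.2.2 < q.2.2))))

def pick_preferred_common_py (cands : List String) : String :=
  if cands = [] then ""            -- if not cands: return ""
  else
    let freq := pvFreqA cands
    match freq.keys with
    | [] => ""                     -- if not freq: return ""
    | k0 :: rest =>                -- max(freq.keys(), key=keyfn): first maximum wins,
                                   -- replace only on a strictly greater key (hand port, exact)
      rest.foldl (fun best y => if pvLt3 (pvKeyA freq best) (pvKeyA freq y) then y else best) k0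

-- ===== PORT B =====
-- B's freq-building loop: 'for c in cands: k = c.strip(); if k: freq[k] = freq.get(k, 0) + 1'
def pvFreqB (cands : List String) : PySem.Dict String Int :=
  cands.foldl
    (fun d c =>
      let k := PySem.Str.strip c
      if k ≠ "" then d.insert k (d.getD k 0 + 1) else d)
    PySem.Dict.empty

def pick_preferred_common_py_alt (cands : List String) : String :=
  let freq := pvFreqB cands
  match freq.keys with
  | [] => ""                       -- if not keys: return ""
  | k0 :: rest =>
    let keys := k0 :: rest
    let top := (PySem.List.max? (keys.map (fun k => freq.getD k 0)) (fun v => v)).getD 0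
    let ks1 := keys.filter (fun k => freq.getD k 0 == top)
    let fewest := (PySem.List.min? (ks1.map pvWords) (fun v => v)).getD 0
    let ks2 := ks1.filter (fun k => pvWords k == fewest)
    let shortest := (PySem.List.min? (ks2.map PySem.Str.len) (fun v => v)).getD 0
    -- 'for k in keys: if len(k) == shortest: return k' — the minimum is attained, so the
    -- loop always returns; ported as find? with an unreachable default
    (ks2.find? (fun k => PySem.Str.len k == shortest)).getD ""

-- ===== PRECONDITION & SPEC =====
def Spec_pick_preferred_common_py (cands : List String) (out : String) : Prop := out = pick_preferred_common_py_alt cands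
instance (cands : List String) (out : String) : Decidable (Spec_pick_preferred_common_py cands out) := by unfold Spec_pick_preferred_common_py; infer_instance

-- ===== CLAIM (what is proved, stated in full; the proofs are below) =====
def Claim_equal_pick_preferred_common_py : Prop := ∀ (cands : List String), Dom_pick_preferred_common_py cands → Spec_pick_preferred_common_py cands (pick_preferred_common_py cands)

-- ===== LEMMAS AND PROOFS =====

-- the two freq-building loops compute the same dict
theorem pvFreqB_eq_A (cands : List String) : pvFreqB cands = pvFreqA cands := by
  unfold pvFreqA pvFreqB
  congr 1
  funext d c
  by_cases h : PySem.Str.strip c = "" <;> simp [h]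

-- order facts about the lexicographic comparison
theorem pvLt3_iff (p q : Int × Int × Int) :
    pvLt3 p q = true ↔ (p.1 < q.1 ∨ (p.1 = q.1 ∧ (p.2.1 < q.2.1 ∨ (p.2.1 = q.2.1 ∧ p.2.2 < q.2.2)))) := by
  simp [pvLt3]

theorem pvLt3_irrefl (p : Int × Int × Int) : ¬ pvLt3 p p = true := by
  obtain ⟨p1, p2, p3⟩ := p; rw [pvLt3_iff]; dsimp only; omega

theorem pvLt3_trans {p q r : Int × Int × Int} (h1 : pvLt3 p q = true) (h2 : pvLt3 q r = true) :
    pvLt3 p r = true := by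
  obtain ⟨p1, p2, p3⟩ := p; obtain ⟨q1, q2, q3⟩ := q; obtain ⟨r1, r2, r3⟩ := r
  rw [pvLt3_iff] at h1 h2 ⊢; dsimp only at h1 h2 ⊢; omega

theorem pvLt3_antisymm {p q : Int × Int × Int} (h1 : ¬ pvLt3 p q = true) (h2 : ¬ pvLt3 q p = true) :
    p = q := by
  obtain ⟨p1, p2, p3⟩ := p; obtain ⟨q1, q2, q3⟩ := q
  rw [pvLt3_iff] at h1 h2; dsimp only at h1 h2
  simp only [Prod.mk.injEq]; omega

theorem pvLt3_le_trans {p q r : Int × Int × Int} (h1 : ¬ pvLt3 q p = true) (h2 : ¬ pvLt3 r q = true) :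
    ¬ pvLt3 r p = true := by
  obtain ⟨p1, p2, p3⟩ := p; obtain ⟨q1, q2, q3⟩ := q; obtain ⟨r1, r2, r3⟩ := r
  rw [pvLt3_iff] at h1 h2 ⊢; dsimp only at h1 h2 ⊢; omega

theorem pvLt3_fst {p q : Int × Int × Int} (h : ¬ pvLt3 p q = true) : q.1 ≤ p.1 := by
  obtain ⟨p1, p2, p3⟩ := p; obtain ⟨q1, q2, q3⟩ := q
  rw [pvLt3_iff] at h; dsimp only at h ⊢; omega

theorem pvLt3_snd {p q : Int × Int × Int} (h : ¬ pvLt3 p q = true) (h1 : q.1 = p.1) : q.2.1 ≤ p.2.1 := by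
  obtain ⟨p1, p2, p3⟩ := p; obtain ⟨q1, q2, q3⟩ := q
  rw [pvLt3_iff] at h; dsimp only at h h1 ⊢; omega

theorem pvLt3_trd {p q : Int × Int × Int} (h : ¬ pvLt3 p q = true) (h1 : q.1 = p.1)
    (h2 : q.2.1 = p.2.1) : q.2.2 ≤ p.2.2 := by
  obtain ⟨p1, p2, p3⟩ := p; obtain ⟨q1, q2, q3⟩ := q
  rw [pvLt3_iff] at h; dsimp only at h h1 h2 ⊢; omega

-- running lexicographic maximum of the key triples (proof device for A's fold)
def pvMax3 (m k : Int × Int × Int) : Int × Int × Int := if pvLt3 m k then k else m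

def pvMaxK (K : String → Int × Int × Int) (a : String) (ys : List String) : Int × Int × Int :=
  ys.foldl (fun m x => pvMax3 m (K x)) (K a)

theorem pvMaxK_cons (K : String → Int × Int × Int) (a y : String) (ys : List String) :
    pvMaxK K a (y :: ys) = pvMaxK K (if pvLt3 (K a) (K y) then y else a) ys := by
  simp only [pvMaxK, List.foldl_cons, pvMax3]
  by_cases h : pvLt3 (K a) (K y) <;> simp [h]

theorem pvMaxK_bound (K : String → Int × Int × Int) (ys : List String) :
    ∀ (a : String), ∀ x ∈ a :: ys, ¬ pvLt3 (pvMaxK K a ys) (K x) = true := by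
  induction ys with
  | nil =>
    intro a x hx
    simp only [List.mem_singleton] at hx
    subst hx
    exact pvLt3_irrefl (K x)
  | cons y ys ih =>
    intro a x hx
    rw [pvMaxK_cons]
    by_cases h : pvLt3 (K a) (K y) = true
    · rw [if_pos h]
      rcases List.mem_cons.mp hx with heq | hx'
      · -- x = a : K a < K y ≤ max
        rw [heq]
        intro hMa
        exact ih y y List.mem_cons_self (pvLt3_trans hMa h)
      · exact ih y x hx'
    · rw [if_neg h]
      rcases List.mem_cons.mp hx with heq | hx'
      · rw [heq]
        exact ih a a List.mem_cons_self
      · rcases List.mem_cons.mp hx' with heq | hx''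
        · -- x = y : K y ≤ K a ≤ max
          rw [heq]
          exact pvLt3_le_trans h (ih a a List.mem_cons_self)
        · exact ih a x (List.mem_cons.mpr (Or.inr hx''))

theorem pvMaxK_attained (K : String → Int × Int × Int) (ys : List String) :
    ∀ (a : String), ∃ m ∈ a :: ys, K m = pvMaxK K a ys := by
  induction ys with
  | nil => intro a; exact ⟨a, List.mem_cons_self, rfl⟩
  | cons y ys ih =>
    intro a
    rw [pvMaxK_cons]
    by_cases h : pvLt3 (K a) (K y) = true
    · rw [if_pos h]
      obtain ⟨m, hm, hKm⟩ := ih y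
      exact ⟨m, by
        rcases List.mem_cons.mp hm with rfl | hm'
        · exact List.mem_cons.mpr (Or.inr List.mem_cons_self)
        · exact List.mem_cons.mpr (Or.inr (List.mem_cons.mpr (Or.inr hm'))), hKm⟩
    · rw [if_neg h]
      obtain ⟨m, hm, hKm⟩ := ih a
      exact ⟨m, by
        rcases List.mem_cons.mp hm with rfl | hm'
        · exact List.mem_cons_self
        · exact List.mem_cons.mpr (Or.inr (List.mem_cons.mpr (Or.inr hm'))), hKm⟩

-- A's fold returns the first element achieving the lexicographic maximum key
theorem pvFold_eq_find (K : String → Int × Int × Int) (ys : List String) :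
    ∀ (a : String),
      ys.foldl (fun best y => if pvLt3 (K best) (K y) then y else best) a
        = ((a :: ys).find? (fun x => K x == pvMaxK K a ys)).getD a := by
  induction ys with
  | nil =>
    intro a
    simp [pvMaxK, List.find?]
  | cons y ys ih =>
    intro a
    rw [List.foldl_cons, pvMaxK_cons]
    by_cases h : pvLt3 (K a) (K y) = true
    · rw [if_pos h]
      rw [ih y]
      -- K a is strictly below the max, so find? skips a; find? is some on y :: ys
      have hbound := pvMaxK_bound K ys y y List.mem_cons_self
      have hKa : ¬ (fun x => K x == pvMaxK K y ys) a = true := by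
        intro hEq
        have hEq' : K a = pvMaxK K y ys := by simpa using hEq
        rw [← hEq'] at hbound
        exact hbound h
      obtain ⟨m, hm, hKm⟩ := pvMaxK_attained K ys y
      have hsome : ((y :: ys).find? (fun x => K x == pvMaxK K y ys)).isSome := by
        rw [List.find?_isSome]
        exact ⟨m, hm, by simp [hKm]⟩
      obtain ⟨r, hr⟩ := Option.isSome_iff_exists.mp hsome
      conv_rhs => rw [List.find?_cons_of_neg (p := fun x => K x == pvMaxK K y ys) hKa]
      rw [hr]
      rfl
    · rw [if_neg h]
      rw [ih a]
      by_cases hPa : (fun x => K x == pvMaxK K a ys) a = true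
      · rw [List.find?_cons_of_pos (p := fun x => K x == pvMaxK K a ys) hPa,
            List.find?_cons_of_pos (p := fun x => K x == pvMaxK K a ys) hPa]
        
      · -- K y ≠ max as well (else K a = max by antisymmetry)
        have hbound := pvMaxK_bound K ys a a List.mem_cons_self
        have hKy : ¬ (fun x => K x == pvMaxK K a ys) y = true := by
          intro hEq
          have hEq' : K y = pvMaxK K a ys := by simpa using hEq
          rw [← hEq'] at hbound
          apply hPa
          show (K a == pvMaxK K a ys) = true
          rw [beq_iff_eq, ← hEq']
          exact pvLt3_antisymm h hbound
        conv_lhs => rw [List.find?_cons_of_neg (p := fun x => K x == pvMaxK K a ys) hPa]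
        conv_rhs => rw [List.find?_cons_of_neg (p := fun x => K x == pvMaxK K a ys) hPa]
        conv_rhs => rw [List.find?_cons_of_neg (p := fun x => K x == pvMaxK K a ys) hKy]

-- the whole nonempty-keys case: A's composite max = B's staged refinement
theorem pvMain (freq : PySem.Dict String Int) (k0 : String) (rest : List String) :
    rest.foldl (fun best y => if pvLt3 (pvKeyA freq best) (pvKeyA freq y) then y else best) k0
      =
    (let keys := k0 :: rest
     let top := (PySem.List.max? (keys.map (fun k => freq.getD k 0)) (fun v => v)).getD 0
     let ks1 := keys.filter (fun k => freq.getD k 0 == top)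
     let fewest := (PySem.List.min? (ks1.map pvWords) (fun v => v)).getD 0
     let ks2 := ks1.filter (fun k => pvWords k == fewest)
     let shortest := (PySem.List.min? (ks2.map PySem.Str.len) (fun v => v)).getD 0
     (ks2.find? (fun k => PySem.Str.len k == shortest)).getD "") := by
  rw [pvFold_eq_find]
  have hbound := pvMaxK_bound (pvKeyA freq) rest k0
  obtain ⟨m, hm, hKm⟩ := pvMaxK_attained (pvKeyA freq) rest k0
  have hm1 : freq.getD m 0 = (pvMaxK (pvKeyA freq) k0 rest).1 := by rw [← hKm]; rfl
  have hm2 : pvWords m = -(pvMaxK (pvKeyA freq) k0 rest).2.1 := by rw [← hKm]; simp [pvKeyA]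
  have hm3 : PySem.Str.len m = -(pvMaxK (pvKeyA freq) k0 rest).2.2 := by rw [← hKm]; simp [pvKeyA]
  -- the top frequency
  obtain ⟨F, hF⟩ : ∃ F, PySem.List.max? ((k0 :: rest).map (fun k => freq.getD k 0)) (fun v => v) = some F := by
    cases hcase : PySem.List.max? ((k0 :: rest).map (fun k => freq.getD k 0)) (fun v => v) with
    | some F => exact ⟨F, rfl⟩
    | none => rw [PySem.List.max?_eq_none_iff] at hcase; simp at hcase
  have hMF : (pvMaxK (pvKeyA freq) k0 rest).1 = F := by
    have h1 : (pvMaxK (pvKeyA freq) k0 rest).1 ≤ F := by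
      have hmem : freq.getD m 0 ∈ (k0 :: rest).map (fun k => freq.getD k 0) :=
        List.mem_map_of_mem hm
      have := PySem.List.max?_isMax hF _ hmem
      omega
    have h2 : F ≤ (pvMaxK (pvKeyA freq) k0 rest).1 := by
      obtain ⟨x0, hx0, hfx0⟩ := List.mem_map.mp (PySem.List.max?_mem hF)
      have hb := pvLt3_fst (hbound x0 hx0)
      simp only [pvKeyA] at hb
      omega
    omega
  simp only [hF, Option.getD_some]
  -- the fewest-words value among top-frequency keys
  have hmks1 : m ∈ (k0 :: rest).filter (fun k => freq.getD k 0 == F) := by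
    rw [List.mem_filter]
    exact ⟨hm, by rw [beq_iff_eq]; omega⟩
  obtain ⟨W, hW⟩ : ∃ W, PySem.List.min? (((k0 :: rest).filter (fun k => freq.getD k 0 == F)).map pvWords) (fun v => v) = some W := by
    cases hcase : PySem.List.min? (((k0 :: rest).filter (fun k => freq.getD k 0 == F)).map pvWords) (fun v => v) with
    | some W => exact ⟨W, rfl⟩
    | none =>
      rw [PySem.List.min?_eq_none_iff] at hcase
      rw [List.map_eq_nil_iff] at hcase
      rw [hcase] at hmks1
      simp at hmks1
  have hMW : -(pvMaxK (pvKeyA freq) k0 rest).2.1 = W := by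
    have h1 : W ≤ pvWords m := PySem.List.min?_isMin hW _ (List.mem_map_of_mem hmks1)
    have h2 : -(pvMaxK (pvKeyA freq) k0 rest).2.1 ≤ W := by
      obtain ⟨y, hy, hwy⟩ := List.mem_map.mp (PySem.List.min?_mem hW)
      rw [List.mem_filter] at hy
      obtain ⟨hykeys, hyF⟩ := hy
      rw [beq_iff_eq] at hyF
      have hb := pvLt3_snd (hbound y hykeys) (by simp only [pvKeyA]; omega)
      simp only [pvKeyA] at hb
      omega
    omega
  simp only [hW, Option.getD_some]
  -- the shortest length among those
  have hmks2 : m ∈ ((k0 :: rest).filter (fun k => freq.getD k 0 == F)).filter (fun k => pvWords k == W) := by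
    rw [List.mem_filter]
    exact ⟨hmks1, by rw [beq_iff_eq]; omega⟩
  obtain ⟨L, hL⟩ : ∃ L, PySem.List.min? ((((k0 :: rest).filter (fun k => freq.getD k 0 == F)).filter (fun k => pvWords k == W)).map PySem.Str.len) (fun v => v) = some L := by
    cases hcase : PySem.List.min? ((((k0 :: rest).filter (fun k => freq.getD k 0 == F)).filter (fun k => pvWords k == W)).map PySem.Str.len) (fun v => v) with
    | some L => exact ⟨L, rfl⟩
    | none =>
      rw [PySem.List.min?_eq_none_iff] at hcase
      rw [List.map_eq_nil_iff] at hcase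
      rw [hcase] at hmks2
      simp at hmks2
  have hML : -(pvMaxK (pvKeyA freq) k0 rest).2.2 = L := by
    have h1 : L ≤ PySem.Str.len m := PySem.List.min?_isMin hL _ (List.mem_map_of_mem hmks2)
    have h2 : -(pvMaxK (pvKeyA freq) k0 rest).2.2 ≤ L := by
      obtain ⟨y, hy, hly⟩ := List.mem_map.mp (PySem.List.min?_mem hL)
      rw [List.mem_filter] at hy
      obtain ⟨hy1, hyW⟩ := hy
      rw [List.mem_filter] at hy1
      obtain ⟨hykeys, hyF⟩ := hy1
      rw [beq_iff_eq] at hyF hyW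
      have hb := pvLt3_trd (hbound y hykeys) (by simp only [pvKeyA]; omega) (by simp only [pvKeyA]; omega)
      simp only [pvKeyA] at hb
      omega
    omega
  simp only [hL, Option.getD_some]
  -- collapse the two filters into the find? predicate
  rw [List.find?_filter, List.find?_filter]
  -- the two find? predicates agree
  have hpredeq : (fun x => pvKeyA freq x == pvMaxK (pvKeyA freq) k0 rest)
      = (fun a => decide ((fun k => freq.getD k 0 == F) a = true ∧
            (fun a => decide ((fun k => pvWords k == W) a = true ∧ (fun k => PySem.Str.len k == L) a = true)) a = true)) := by
    funext x
    rw [Bool.eq_iff_iff]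
    simp only [beq_iff_eq, decide_eq_true_eq]
    constructor
    · intro hx
      have e1 : freq.getD x 0 = (pvMaxK (pvKeyA freq) k0 rest).1 := by rw [← hx]; rfl
      have e2 : -(pvWords x) = (pvMaxK (pvKeyA freq) k0 rest).2.1 := by rw [← hx]; rfl
      have e3 : -(PySem.Str.len x) = (pvMaxK (pvKeyA freq) k0 rest).2.2 := by rw [← hx]; rfl
      refine ⟨by omega, by omega, by omega⟩
    · rintro ⟨hx1, hx2, hx3⟩
      simp only [pvKeyA]
      have hev : pvMaxK (pvKeyA freq) k0 rest
          = ((pvMaxK (pvKeyA freq) k0 rest).1,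
             (pvMaxK (pvKeyA freq) k0 rest).2.1, (pvMaxK (pvKeyA freq) k0 rest).2.2) := rfl
      rw [hev]
      simp only [Prod.mk.injEq]
      refine ⟨by omega, by omega, by omega⟩
  rw [hpredeq]
  -- find? succeeds, so the two defaults are irrelevant
  have hsome : ((k0 :: rest).find? (fun a => decide ((fun k => freq.getD k 0 == F) a = true ∧
      (fun a => decide ((fun k => pvWords k == W) a = true ∧ (fun k => PySem.Str.len k == L) a = true)) a = true))).isSome := by
    rw [List.find?_isSome]
    refine ⟨m, hm, ?_⟩
    simp only [beq_iff_eq, decide_eq_true_eq]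
    refine ⟨by omega, by omega, by omega⟩
  obtain ⟨r, hr⟩ := Option.isSome_iff_exists.mp hsome
  rw [hr]
  rfl

-- ===== VERDICT (by name: the statement is the Claim_ definition above) =====
theorem pick_preferred_common_py_spec : Claim_equal_pick_preferred_common_py := by
  intro cands _
  unfold Spec_pick_preferred_common_py
  unfold pick_preferred_common_py pick_preferred_common_py_alt
  rw [pvFreqB_eq_A]
  by_cases hc : cands = []
  · subst hc
    simp [pvFreqA, PySem.Dict.empty, PySem.Dict.keys]
  · simp only [if_neg hc]
    cases hk : (pvFreqA cands).keys with
    | nil => rfl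
    | cons k0 rest => exact pvMain (pvFreqA cands) k0 rest
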